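-- pv_equiv track=rewrite | github.com/MrBrantCode/unitest_baseline | mut_generate/mist_train_cf/cf_14096/solution.py | find_largest_common_factor
-- ===== SOURCE A (Python) =====
-- def find_largest_common_factor(N1, N2, R):
--     # Find the smaller number between N1 and N2
--     if N1 < N2:
--         smaller = N1
--     else:
--         smaller = N2
--
--     largest_common_factor = -1
--     # Iterate from 1 to R
--     for i in range(1, R + 1):
--         # Check if i is a factor of both N1 and N2
--         if N1 % i == 0 and N2 % i == 0:
--             # Update the largest common factor
--             largest_common_factor = i
--
--     return largest_common_factor
-- ===== SOURCE B (Python) =====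
-- def find_largest_common_factor(N1, N2, R):
--     if R < 1:
--         return -1
--     # Euclid's algorithm on absolute values
--     a = N1 if N1 >= 0 else -N1
--     b = N2 if N2 >= 0 else -N2
--     while b:
--         a, b = b, a % b
--     g = a
--     if g == 0:
--         # every positive integer divides both; largest allowed is R
--         return R
--     # enumerate divisors of g in pairs (i, g // i) up to sqrt(g)
--     best = 1
--     i = 1
--     while i * i <= g:
--         if g % i == 0:
--             if i <= R:
--                 best = max(best, i)
--             j = g // i
--             if j <= R:
--                 best = max(best, j)
--         i += 1
--     return best
-- ===== Notes on version B (the rewrite author's own statement) =====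
-- stated objective: faster
-- what changed: Instead of scanning every i in [1,R] for common divisibility, B computes g = gcd(N1,N2) by Euclid's algorithm and enumerates divisors of g in pairs up to sqrt(g), returning the largest divisor <= R (R itself when g = 0, -1 when R < 1).
import Mathlib
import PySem

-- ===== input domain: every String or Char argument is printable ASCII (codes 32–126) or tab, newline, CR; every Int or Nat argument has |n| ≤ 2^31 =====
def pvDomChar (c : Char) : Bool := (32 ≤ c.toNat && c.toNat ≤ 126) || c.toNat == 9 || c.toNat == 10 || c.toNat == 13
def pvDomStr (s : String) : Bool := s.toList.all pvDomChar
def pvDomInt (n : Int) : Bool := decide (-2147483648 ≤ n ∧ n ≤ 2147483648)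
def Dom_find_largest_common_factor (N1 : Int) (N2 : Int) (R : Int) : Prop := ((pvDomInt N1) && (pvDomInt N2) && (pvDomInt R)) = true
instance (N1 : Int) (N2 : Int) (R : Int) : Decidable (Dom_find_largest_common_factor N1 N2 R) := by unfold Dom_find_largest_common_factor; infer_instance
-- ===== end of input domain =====

-- B replaces A's O(R) scan over [1,R] with Euclid's gcd followed by paired divisor
-- enumeration up to sqrt(gcd); measured faster (asymptotic change).

-- ===== PORT A =====
-- the loop body: `if N1 % i == 0 and N2 % i == 0: largest_common_factor = i`
def find_largest_common_factor (N1 : Int) (N2 : Int) (R : Int) : Int :=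
  -- `smaller` is computed by A but never used; we mirror it with a let
  let _smaller : Int := if N1 < N2 then N1 else N2
  (PySem.List.pyRange 1 (R + 1) 1).foldl
    (fun acc i => if PySem.Int.mod N1 i = 0 ∧ PySem.Int.mod N2 i = 0 then i else acc)
    (-1)

-- ===== PORT B =====
-- `while b: a, b = b, a % b` of Source B (Euclid on the absolute values, already Nats here)
def pvGcdLoop (a b : Nat) : Nat :=
  if b = 0 then a else pvGcdLoop b (a % b)
decreasing_by exact Nat.mod_lt _ (Nat.pos_of_ne_zero (by assumption))

-- `while i * i <= g:` divisor-pair loop of Source B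
def pvDivLoop (g R : Nat) (i : Nat) (best : Nat) : Nat :=
  if _h : i * i ≤ g then
    let best := if g % i = 0 then
        let best := if i ≤ R then max best i else best
        let j := g / i
        if j ≤ R then max best j else best
      else best
    pvDivLoop g R (i + 1) best
  else best
termination_by g + 1 - i * i
decreasing_by
  have h2 : i * i < (i + 1) * (i + 1) := by nlinarith
  omega

def find_largest_common_factor_alt (N1 : Int) (N2 : Int) (R : Int) : Int :=
  if R < 1 then -1
  else
    let g := pvGcdLoop N1.natAbs N2.natAbs
    if g = 0 then R
    else (pvDivLoop g R.toNat 1 1 : Int)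

-- ===== PRECONDITION & SPEC =====
def Spec_find_largest_common_factor (N1 : Int) (N2 : Int) (R : Int) (out : Int) : Prop := out = find_largest_common_factor_alt N1 N2 R
instance (N1 : Int) (N2 : Int) (R : Int) (out : Int) : Decidable (Spec_find_largest_common_factor N1 N2 R out) := by unfold Spec_find_largest_common_factor; infer_instance

-- ===== CLAIM (what is proved, stated in full; the proofs are below) =====
def Claim_equal_find_largest_common_factor : Prop := ∀ (N1 : Int) (N2 : Int) (R : Int), Dom_find_largest_common_factor N1 N2 R → Spec_find_largest_common_factor N1 N2 R (find_largest_common_factor N1 N2 R)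

-- ===== LEMMAS AND PROOFS =====

theorem pvGcdLoop_eq_gcd (a b : Nat) : pvGcdLoop a b = Nat.gcd a b := by
  induction b using Nat.strong_induction_on generalizing a with
  | _ b ih =>
    rw [pvGcdLoop]
    by_cases hb : b = 0
    · simp [hb]
    · rw [if_neg hb, ih (a % b) (Nat.mod_lt _ (Nat.pos_of_ne_zero hb)) b,
        Nat.gcd_comm a b, Nat.gcd_rec b a]
      exact (Nat.gcd_comm _ _)

-- the A-side loop over range(1, n+1) computes Nat.findGreatest of the divisibility predicate
theorem pvFoldl_findGreatest (N1 N2 : Int) (n : Nat) :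
    (PySem.List.pyRange 1 ((n : Int) + 1) 1).foldl
      (fun acc i => if PySem.Int.mod N1 i = 0 ∧ PySem.Int.mod N2 i = 0 then i else acc) (-1)
    = (if Nat.findGreatest (fun d => (d : Int) ∣ N1 ∧ (d : Int) ∣ N2) n = 0 then (-1 : Int)
       else (Nat.findGreatest (fun d => (d : Int) ∣ N1 ∧ (d : Int) ∣ N2) n : Int)) := by
  induction n with
  | zero => simp
  | succ n ih =>
    have hsplit : PySem.List.pyRange 1 ((↑(n+1) : Int) + 1) 1
        = PySem.List.pyRange 1 ((n : Int) + 1) 1 ++ [((n : Int) + 1)] := by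
      have := PySem.List.pyRange_one_succ_right (a := 1) (b := (n : Int) + 1) (by omega)
      simpa [Nat.cast_add, Nat.cast_one] using this
    rw [hsplit, List.foldl_append]
    simp only [List.foldl_cons, List.foldl_nil]
    rw [ih]
    have hmod : (PySem.Int.mod N1 ((n : Int) + 1) = 0 ∧ PySem.Int.mod N2 ((n : Int) + 1) = 0)
        ↔ ((((n+1 : Nat)) : Int) ∣ N1 ∧ (((n+1 : Nat)) : Int) ∣ N2) := by
      push_cast
      rw [PySem.Int.mod_eq_zero_iff_dvd, PySem.Int.mod_eq_zero_iff_dvd]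
    rw [Nat.findGreatest_succ]
    by_cases hp : (((n+1 : Nat)) : Int) ∣ N1 ∧ (((n+1 : Nat)) : Int) ∣ N2
    · rw [if_pos (hmod.mpr hp), if_pos hp, if_neg (by omega)]
      push_cast; ring
    · rw [if_neg (fun h => hp (hmod.mp h)), if_neg hp]

-- the step value: what one iteration of the while-body does to `best`
def pvStepVal (g R i best : Nat) : Nat :=
  if g % i = 0 then
    let b1 := if i ≤ R then max best i else best
    let j := g / i
    if j ≤ R then max b1 j else b1
  else best

theorem pvDivLoop_eq (g R i best : Nat) :
    pvDivLoop g R i best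
      = if i * i ≤ g then pvDivLoop g R (i + 1) (pvStepVal g R i best) else best := by
  rw [pvDivLoop]
  by_cases h : i * i ≤ g
  · rw [dif_pos h, if_pos h]; rfl
  · rw [dif_neg h, if_neg h]

theorem pvStepVal_ge (g R i best : Nat) : best ≤ pvStepVal g R i best := by
  unfold pvStepVal
  dsimp only
  split_ifs <;> simp

theorem pvStepVal_dvd (g R i best : Nat) (hi : 0 < i) (hb : best ∣ g) (hbR : best ≤ R) :
    pvStepVal g R i best ∣ g ∧ pvStepVal g R i best ≤ R := by
  unfold pvStepVal
  by_cases hm : g % i = 0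
  · rw [if_pos hm]
    have hidvd : i ∣ g := Nat.dvd_iff_mod_eq_zero.mpr hm
    have hjdvd : g / i ∣ g := Nat.div_dvd_of_dvd hidvd
    dsimp only
    by_cases h1 : i ≤ R
    · rw [if_pos h1]
      by_cases h2 : g / i ≤ R
      · rw [if_pos h2]
        refine ⟨?_, by omega⟩
        rcases max_choice (max best i) (g / i) with hmx | hmx <;> rw [hmx]
        · rcases max_choice best i with hmx2 | hmx2 <;> rw [hmx2] <;> assumption
        · exact hjdvd
      · rw [if_neg h2]
        refine ⟨?_, by omega⟩
        rcases max_choice best i with hmx2 | hmx2 <;> rw [hmx2] <;> assumption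
    · rw [if_neg h1]
      by_cases h2 : g / i ≤ R
      · rw [if_pos h2]
        refine ⟨?_, by omega⟩
        rcases max_choice best (g / i) with hmx | hmx <;> rw [hmx] <;> assumption
      · rw [if_neg h2]; exact ⟨hb, hbR⟩
  · rw [if_neg hm]; exact ⟨hb, hbR⟩

theorem pvStepVal_hit_i (g R i best : Nat) (hm : g % i = 0) (hiR : i ≤ R) :
    i ≤ pvStepVal g R i best := by
  unfold pvStepVal
  dsimp only
  rw [if_pos hm, if_pos hiR]
  split_ifs <;> simp

theorem pvStepVal_hit_j (g R i best : Nat) (hm : g % i = 0) (hjR : g / i ≤ R) :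
    g / i ≤ pvStepVal g R i best := by
  unfold pvStepVal
  dsimp only
  rw [if_pos hm, if_pos hjR]
  simp

-- pvDivLoop never decreases below its accumulator
theorem pvDivLoop_ge_best (g R : Nat) : ∀ i best, best ≤ pvDivLoop g R i best := by
  intro i best
  induction i, best using pvDivLoop.induct g R with
  | case1 i best h best1 ih =>
    rw [pvDivLoop_eq, if_pos h]
    exact le_trans (pvStepVal_ge g R i best) ih
  | case2 i best h => rw [pvDivLoop_eq, if_neg h]

-- the result is a divisor of g that is ≤ R (given the accumulator is)
theorem pvDivLoop_divides (g R : Nat) : ∀ i best, 0 < i →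
    best ∣ g → best ≤ R → pvDivLoop g R i best ∣ g ∧ pvDivLoop g R i best ≤ R := by
  intro i best
  induction i, best using pvDivLoop.induct g R with
  | case1 i best h best1 ih =>
    intro hi hbd hbR
    rw [pvDivLoop_eq, if_pos h]
    have hstep := pvStepVal_dvd g R i best hi hbd hbR
    exact ih (by omega) hstep.1 hstep.2
  | case2 i best h =>
    intro _ hbd hbR
    rw [pvDivLoop_eq, if_neg h]
    exact ⟨hbd, hbR⟩

-- any divisor d ≤ R of g still "reachable" from step i is ≤ the result
theorem pvDivLoop_max (g R : Nat) (hg : 0 < g) : ∀ i best, 0 < i →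
    ∀ d, d ∣ g → d ≤ R → ((i ≤ d ∧ d * d ≤ g) ∨ (i ≤ g / d ∧ g ≤ d * d)) →
    d ≤ pvDivLoop g R i best := by
  intro i best
  induction i, best using pvDivLoop.induct g R with
  | case1 i best h best1 ih =>
    intro hi d hdvd hdR hcase
    have hd : 0 < d := Nat.pos_of_dvd_of_pos hdvd hg
    rw [pvDivLoop_eq, if_pos h]
    by_cases hdone : d = i ∨ g / d = i
    · -- d is recorded into the accumulator at this step
      refine le_trans ?_ (pvDivLoop_ge_best g R (i + 1) (pvStepVal g R i best))
      rcases hdone with rfl | hcof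
      · exact pvStepVal_hit_i g R d best (Nat.dvd_iff_mod_eq_zero.mp hdvd) hdR
      · have hcdvd : g / d ∣ g := Nat.div_dvd_of_dvd hdvd
        have hipos : 0 < i := hi
        have hmod : g % i = 0 := by
          rw [← hcof]
          exact Nat.dvd_iff_mod_eq_zero.mp hcdvd
        have hgi : g / i = d := by rw [← hcof, Nat.div_div_self hdvd (by omega)]
        have := pvStepVal_hit_j g R i best hmod (hgi ▸ hdR)
        omega
    · push_neg at hdone
      apply ih (by omega) d hdvd hdR
      rcases hcase with ⟨h1, h2⟩ | ⟨h1, h2⟩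
      · exact Or.inl ⟨by omega, h2⟩
      · exact Or.inr ⟨by omega, h2⟩
  | case2 i best h =>
    intro hi d hdvd hdR hcase
    have hd : 0 < d := Nat.pos_of_dvd_of_pos hdvd hg
    exfalso
    rcases hcase with ⟨h1, h2⟩ | ⟨h1, h2⟩
    · exact h (le_trans (Nat.mul_le_mul h1 h1) h2)
    · have hc : g / d * d = g := Nat.div_mul_cancel hdvd
      have hcd : g / d ≤ d := Nat.le_of_mul_le_mul_right (by omega) hd
      have hsq : g / d * (g / d) ≤ g := by nlinarith
      exact h (le_trans (Nat.mul_le_mul h1 h1) hsq)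

-- with g ≥ 1, R ≥ 1, the divisor loop equals Nat.findGreatest (· ∣ g) R
theorem pvDivLoop_eq_findGreatest (g R : Nat) (hg : 0 < g) (hR : 0 < R) :
    pvDivLoop g R 1 1 = Nat.findGreatest (· ∣ g) R := by
  have hbprops := pvDivLoop_divides g R 1 1 (by omega) (one_dvd g) hR
  have hF1 : 1 ≤ Nat.findGreatest (· ∣ g) R := Nat.le_findGreatest hR (one_dvd g)
  have hFR : Nat.findGreatest (· ∣ g) R ≤ R := Nat.findGreatest_le R
  have hFdvd : Nat.findGreatest (· ∣ g) R ∣ g :=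
    Nat.findGreatest_spec (P := (· ∣ g)) hR (one_dvd g)
  have hFg : Nat.findGreatest (· ∣ g) R ≤ g := Nat.le_of_dvd hg hFdvd
  apply le_antisymm
  · exact Nat.le_findGreatest hbprops.2 hbprops.1
  · apply pvDivLoop_max g R hg 1 1 (by omega) _ hFdvd hFR
    rcases Nat.lt_or_ge g (Nat.findGreatest (· ∣ g) R * Nat.findGreatest (· ∣ g) R) with hlt | hle
    · refine Or.inr ⟨?_, by omega⟩
      exact (Nat.le_div_iff_mul_le (by omega)).mpr (by omega)
    · exact Or.inl ⟨hF1, hle⟩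

theorem pvFindGreatest_congr {p q : Nat → Prop} [DecidablePred p] [DecidablePred q]
    (h : ∀ m, p m ↔ q m) (n : Nat) : Nat.findGreatest p n = Nat.findGreatest q n := by
  induction n with
  | zero => rfl
  | succ n ih =>
    rw [Nat.findGreatest_succ, Nat.findGreatest_succ, ih]
    simp only [h]

-- ===== VERDICT (by name: the statement is the Claim_ definition above) =====
theorem find_largest_common_factor_spec : Claim_equal_find_largest_common_factor := by
  intro N1 N2 R _
  unfold Spec_find_largest_common_factor find_largest_common_factor find_largest_common_factor_alt
  by_cases hR : R < 1
  · rw [if_pos hR, PySem.List.pyRange_one_eq_nil (by omega)]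
    rfl
  · rw [if_neg hR]
    obtain ⟨n, rfl⟩ : ∃ n : Nat, R = (n : Int) :=
      ⟨R.toNat, (Int.toNat_of_nonneg (by omega)).symm⟩
    have hn1 : 1 ≤ n := by omega
    show (PySem.List.pyRange 1 ((n : Int) + 1) 1).foldl _ (-1) = _
    rw [pvFoldl_findGreatest N1 N2 n, pvGcdLoop_eq_gcd]
    have hP : ∀ m : Nat, ((m : Int) ∣ N1 ∧ (m : Int) ∣ N2) ↔ m ∣ Nat.gcd N1.natAbs N2.natAbs := by
      intro m
      rw [Int.natCast_dvd, Int.natCast_dvd, Nat.dvd_gcd_iff]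
    rw [pvFindGreatest_congr hP n]
    by_cases hg0 : Nat.gcd N1.natAbs N2.natAbs = 0
    · rw [if_pos hg0]
      have hFn : Nat.findGreatest (· ∣ Nat.gcd N1.natAbs N2.natAbs) n = n := by
        obtain ⟨m, rfl⟩ : ∃ m, n = m + 1 := ⟨n - 1, by omega⟩
        rw [Nat.findGreatest_succ, if_pos (by rw [hg0]; exact Nat.dvd_zero _)]
      rw [hFn, if_neg (by omega)]
    · rw [if_neg hg0]
      have hgpos : 0 < Nat.gcd N1.natAbs N2.natAbs := Nat.pos_of_ne_zero hg0
      have hloop := pvDivLoop_eq_findGreatest (Nat.gcd N1.natAbs N2.natAbs)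
        ((n : Int)).toNat hgpos (by simp; omega)
      simp only [Int.toNat_natCast] at hloop ⊢
      rw [hloop]
      have hF1 : 1 ≤ Nat.findGreatest (· ∣ Nat.gcd N1.natAbs N2.natAbs) n :=
        Nat.le_findGreatest hn1 (one_dvd _)
      rw [if_neg (by omega)]
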